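-- pv_equiv track=rewrite | github.com/rewardMap/rewardGym | rewardgym/tasks/utils.py | check_conditions_not_following_substring
-- ===== SOURCE A (Python) =====
-- from typing import Any, List, Literal, Tuple, Union
--
-- def check_conditions_not_following_substring(
--     condition_list: List[str], not_following: List[str], window_length: int = 1
-- ) -> bool:
--     """
--     Checks if any substrings in the condition_list are followed by elements containing substrings from
--     the not_following list within a specified window length.
--
--     Parameters
--     ----------
--     condition_list : List[str]
--         The list of strings to check.
--     not_following : List[str]
--         The list of substrings that should not follow any string in condition_list.
--     window_length : int, optional
--         The length of the window to check after each element in condition_list, by default 1.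
--
--     Returns
--     -------
--     bool
--         Returns True if no strings containing substrings from not_following appear within the window length
--         after any element in condition_list, False otherwise.
--     """
--     for n in range(len(condition_list)):
--         # Check if the current element contains any substring from not_following
--         if any(substring in condition_list[n] for substring in not_following):
--             # Check the elements within the window for the presence of not_following substrings
--             if any(
--                 any(substring in condition_list[k] for substring in not_following)
--                 for k in range(n + 1, min(n + 1 + window_length, len(condition_list)))
--             ):
--                 return False
--     return True
-- ===== SOURCE B (Python) =====
-- def check_conditions_not_following_substring(
--     condition_list, not_following, window_length=1
-- ):
--     # One pass: remember the index of the last element containing a not_following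
--     # substring; fail iff two such elements are at most window_length apart.
--     last = None
--     for i, s in enumerate(condition_list):
--         if any(sub in s for sub in not_following):
--             if last is not None and i - last <= window_length:
--                 return False
--             last = i
--     return True
-- ===== Notes on version B (the rewrite author's own statement) =====
-- stated objective: alternative
-- what changed: Replaces the nested window rescan (for every flagged element, re-test every element in the following window) by a single pass that tests each element once and keeps only the index of the last flagged element, failing iff two flagged indices are at most window_length apart.
import Mathlib
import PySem

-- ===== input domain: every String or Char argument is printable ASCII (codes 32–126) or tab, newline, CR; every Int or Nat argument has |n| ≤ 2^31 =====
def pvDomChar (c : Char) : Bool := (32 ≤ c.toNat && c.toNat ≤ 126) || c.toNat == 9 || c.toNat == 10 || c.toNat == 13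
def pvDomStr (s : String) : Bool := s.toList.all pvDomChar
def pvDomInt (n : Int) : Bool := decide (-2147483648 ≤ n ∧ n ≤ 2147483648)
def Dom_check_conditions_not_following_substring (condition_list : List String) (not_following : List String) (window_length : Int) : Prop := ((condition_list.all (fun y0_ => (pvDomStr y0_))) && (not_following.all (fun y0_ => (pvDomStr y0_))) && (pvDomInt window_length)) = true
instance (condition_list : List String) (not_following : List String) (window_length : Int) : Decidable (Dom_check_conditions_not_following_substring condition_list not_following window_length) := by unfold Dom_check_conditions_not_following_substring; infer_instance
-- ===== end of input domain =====

-- B replaces A's per-hit rescan of the whole following window by a single pass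
-- that remembers only the index of the last element containing a not_following
-- substring (objective: alternative single-pass formulation).

-- ===== PORT A =====
-- `any(substring in condition_list[n] for substring in not_following)` (shared text of both Pythons)
def pvHasNF (not_following : List String) (s : String) : Bool :=
  not_following.any (fun sub => PySem.Str.isIn sub s)

-- the `for n in range(len(condition_list))` loop with its early `return False`
def pvGoA (cl nf : List String) (w : Int) (n : Nat) : Bool :=
  if h : n < cl.length then
    if pvHasNF nf (cl.getD n "") then
      if (PySem.List.pyRange ((n : Int) + 1) (min ((n : Int) + 1 + w) (cl.length : Int)) 1).any
           (fun k => pvHasNF nf (PySem.List.pyGetD cl k "")) then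
        false
      else pvGoA cl nf w (n + 1)
    else pvGoA cl nf w (n + 1)
  else true
termination_by cl.length - n

def check_conditions_not_following_substring (condition_list : List String) (not_following : List String) (window_length : Int) : Bool :=
  pvGoA condition_list not_following window_length 0

-- ===== PORT B =====
-- the `for i, s in enumerate(condition_list)` loop carrying `last`
def pvGoB (nf : List String) (w : Int) : List String → Nat → Option Nat → Bool
  | [], _, _ => true
  | s :: rest, i, last =>
    if pvHasNF nf s then
      match last with
      | some l => if (i : Int) - (l : Int) ≤ w then false else pvGoB nf w rest (i + 1) (some i)
      | none => pvGoB nf w rest (i + 1) (some i)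
    else pvGoB nf w rest (i + 1) last

def check_conditions_not_following_substring_alt (condition_list : List String) (not_following : List String) (window_length : Int) : Bool :=
  pvGoB not_following window_length condition_list 0 none

-- ===== PRECONDITION & SPEC =====
def Spec_check_conditions_not_following_substring (condition_list : List String) (not_following : List String) (window_length : Int) (out : Bool) : Prop := out = check_conditions_not_following_substring_alt condition_list not_following window_length
instance (condition_list : List String) (not_following : List String) (window_length : Int) (out : Bool) : Decidable (Spec_check_conditions_not_following_substring condition_list not_following window_length out) := by unfold Spec_check_conditions_not_following_substring; infer_instance

-- ===== CLAIM (what is proved, stated in full; the proofs are below) =====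
def Claim_equal_check_conditions_not_following_substring : Prop := ∀ (condition_list : List String) (not_following : List String) (window_length : Int), Dom_check_conditions_not_following_substring condition_list not_following window_length → Spec_check_conditions_not_following_substring condition_list not_following window_length (check_conditions_not_following_substring condition_list not_following window_length)

-- ===== LEMMAS AND PROOFS =====

-- `hit` abbreviation used by the characterisations
def pvHit (cl nf : List String) (i : Nat) : Bool := pvHasNF nf (cl.getD i "")

-- the "bad" property both programs detect: two hits at distance ≤ w
def pvBad (cl nf : List String) (w : Int) : Prop :=
  ∃ i j : Nat, i < j ∧ j < cl.length ∧ (j : Int) ≤ (i : Int) + w ∧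
    pvHit cl nf i = true ∧ pvHit cl nf j = true

theorem pvWindow_iff (cl nf : List String) (w : Int) (n : Nat) :
    ((PySem.List.pyRange ((n : Int) + 1) (min ((n : Int) + 1 + w) (cl.length : Int)) 1).any
       (fun k => pvHasNF nf (PySem.List.pyGetD cl k "")) = true) ↔
    ∃ j : Nat, n < j ∧ j < cl.length ∧ (j : Int) ≤ (n : Int) + w ∧ pvHit cl nf j = true := by
  rw [List.any_eq_true]
  constructor
  · rintro ⟨k, hk, hh⟩
    rw [PySem.List.mem_pyRange_one] at hk
    obtain ⟨hk1, hk2⟩ := hk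
    have h0 : 0 ≤ k := by omega
    refine ⟨k.toNat, by omega, by omega, by omega, ?_⟩
    have : k = ((k.toNat : Nat) : Int) := by omega
    rw [this] at hh
    rw [PySem.List.pyGetD_natCast] at hh
    exact hh
  · rintro ⟨j, h1, h2, h3, hh⟩
    refine ⟨(j : Int), ?_, ?_⟩
    · rw [PySem.List.mem_pyRange_one]; omega
    · rw [PySem.List.pyGetD_natCast]; exact hh

theorem pvGoA_false_iff (cl nf : List String) (w : Int) (n : Nat) :
    pvGoA cl nf w n = false ↔
      ∃ i j : Nat, n ≤ i ∧ i < j ∧ j < cl.length ∧ (j : Int) ≤ (i : Int) + w ∧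
        pvHit cl nf i = true ∧ pvHit cl nf j = true := by
  fun_induction pvGoA cl nf w n with
  | case1 n h hhit hwin =>
    rw [pvWindow_iff] at hwin
    obtain ⟨j, h1, h2, h3, hh⟩ := hwin
    simp only [true_iff]
    exact ⟨n, j, le_refl n, h1, h2, h3, hhit, hh⟩
  | case2 n h hhit hwin ih =>
    rw [ih]
    constructor
    · rintro ⟨i, j, h1, rest⟩; exact ⟨i, j, by omega, rest⟩
    · rintro ⟨i, j, h1, h2, h3, h4, h5, h6⟩
      rcases Nat.eq_or_lt_of_le h1 with heq | hlt
      · exfalso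
        apply hwin
        rw [pvWindow_iff]
        exact ⟨j, by omega, h3, by omega, h6⟩
      · exact ⟨i, j, by omega, h2, h3, h4, h5, h6⟩
  | case3 n h hhit ih =>
    rw [ih]
    constructor
    · rintro ⟨i, j, h1, rest⟩; exact ⟨i, j, by omega, rest⟩
    · rintro ⟨i, j, h1, h2, h3, h4, h5, h6⟩
      rcases Nat.eq_or_lt_of_le h1 with heq | hlt
      · exfalso; subst heq; exact hhit h5
      · exact ⟨i, j, by omega, h2, h3, h4, h5, h6⟩
  | case4 n h =>
    simp only [Bool.true_eq_false, false_iff]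
    rintro ⟨i, j, h1, h2, h3, _⟩; omega

theorem pvGoB_false_iff (cl nf : List String) (w : Int) :
    ∀ (i : Nat) (last : Option Nat),
      (∀ a b : Nat, a < b → b < i → (b : Int) ≤ (a : Int) + w →
        pvHit cl nf a = true → pvHit cl nf b = false) →
      (match last with
       | none => ∀ m : Nat, m < i → pvHit cl nf m = false
       | some l => l < i ∧ pvHit cl nf l = true ∧
           ∀ m : Nat, l < m → m < i → pvHit cl nf m = false) →
      (pvGoB nf w (cl.drop i) i last = false ↔ pvBad cl nf w) := by
  suffices H : ∀ (n i : Nat) (last : Option Nat), cl.length - i = n →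
      (∀ a b : Nat, a < b → b < i → (b : Int) ≤ (a : Int) + w →
        pvHit cl nf a = true → pvHit cl nf b = false) →
      (match last with
       | none => ∀ m : Nat, m < i → pvHit cl nf m = false
       | some l => l < i ∧ pvHit cl nf l = true ∧
           ∀ m : Nat, l < m → m < i → pvHit cl nf m = false) →
      (pvGoB nf w (cl.drop i) i last = false ↔ pvBad cl nf w) by
    intro i last hNB hL
    exact H (cl.length - i) i last rfl hNB hL
  intro n
  induction n with
  | zero =>
    intro i last hfuel hNB hL
    rw [List.drop_eq_nil_iff.mpr (by omega)]
    simp only [pvGoB, Bool.true_eq_false, false_iff]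
    rintro ⟨a, b, h1, h2, h3, h4, h5⟩
    have := hNB a b h1 (by omega) h3 h4
    simp [this] at h5
  | succ n ih =>
    intro i last hfuel hNB hL
    have hlt : i < cl.length := by omega
    rw [List.drop_eq_getElem_cons hlt]
    have hgetD : cl.getD i "" = cl[i] := List.getD_eq_getElem cl "" hlt
    by_cases hp : pvHasNF nf cl[i] = true
    · have hhit : pvHit cl nf i = true := by rw [pvHit, hgetD]; exact hp
      cases last with
      | some l =>
        obtain ⟨hl1, hl2, hl3⟩ := hL
        simp only [pvGoB, hp, if_true]
        by_cases hw : (i : Int) - (l : Int) ≤ w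
        · rw [if_pos hw]
          simp only [true_iff]
          exact ⟨l, i, hl1, hlt, by omega, hl2, hhit⟩
        · rw [if_neg hw]
          refine ih (i + 1) (some i) (by omega) ?_ ⟨by omega, hhit, by omega⟩
          intro a b hab hb hbw ha
          rcases Nat.lt_or_ge b i with hbi | hbi
          · exact hNB a b hab hbi hbw ha
          · have hbe : b = i := by omega
            subst hbe
            have hal : a ≤ l := by
              rcases Nat.lt_or_ge a l with h | h
              · omega
              · rcases Nat.eq_or_lt_of_le h with h' | h'
                · omega
                · exfalso; have := hl3 a h' (by omega); simp [this] at ha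
            exfalso; apply hw; omega
      | none =>
        simp only [pvGoB, hp, if_true]
        refine ih (i + 1) (some i) (by omega) ?_ ⟨by omega, hhit, by omega⟩
        intro a b hab hb hbw ha
        rcases Nat.lt_or_ge b i with hbi | hbi
        · exact hNB a b hab hbi hbw ha
        · have hbe : b = i := by omega
          subst hbe
          exfalso; have := hL a (by omega); simp [this] at ha
    · have hhit : pvHit cl nf i = false := by
        rw [pvHit, hgetD]; exact Bool.eq_false_iff.mpr hp
      simp only [pvGoB, hp, if_false, Bool.false_eq_true]
      refine ih (i + 1) last (by omega) ?_ ?_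
      · intro a b hab hb hbw ha
        rcases Nat.lt_or_ge b i with hbi | hbi
        · exact hNB a b hab hbi hbw ha
        · have hbe : b = i := by omega
          subst hbe; exact hhit
      · cases last with
        | none =>
          intro m hm
          rcases Nat.lt_or_ge m i with h | h
          · exact hL m h
          · have : m = i := by omega
            subst this; exact hhit
        | some l =>
          obtain ⟨hl1, hl2, hl3⟩ := hL
          refine ⟨by omega, hl2, ?_⟩
          intro m h1 h2
          rcases Nat.lt_or_ge m i with h | h
          · exact hl3 m h1 h
          · have : m = i := by omega
            subst this; exact hhit

-- ===== VERDICT (by name: the statement is the Claim_ definition above) =====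
theorem check_conditions_not_following_substring_spec : Claim_equal_check_conditions_not_following_substring := by
  intro cl nf w _
  unfold Spec_check_conditions_not_following_substring
  unfold check_conditions_not_following_substring check_conditions_not_following_substring_alt
  have hA : pvGoA cl nf w 0 = false ↔ pvBad cl nf w := by
    rw [pvGoA_false_iff]
    constructor
    · rintro ⟨i, j, _, h⟩; exact ⟨i, j, h⟩
    · rintro ⟨i, j, h⟩; exact ⟨i, j, Nat.zero_le i, h⟩
  have hB : pvGoB nf w (cl.drop 0) 0 none = false ↔ pvBad cl nf w := by
    apply pvGoB_false_iff
    · intro a b _ hb; omega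
    · intro m hm; omega
  rw [List.drop_zero] at hB
  cases hA' : pvGoA cl nf w 0 <;> cases hB' : pvGoB nf w cl 0 none <;> simp_all
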